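-- pv_equiv track=rewrite | github.com/noorulhudaajmal/NLP-playground | Document-Search/utils.py | simple_hash_table
-- ===== SOURCE A (Python) =====
-- def simple_hash_table(values_list: list, n_bins: int) -> dict:
--     """
--     function to compute hash value for an integer
--     :param values_list: list of integers
--     :param n_bins: number of bins in hashtable
--     :return: hash table
--     """
--
--     def hash_function(value: int, n_bins: int) -> int:
--         return int(value) % n_bins
--
--     hash_table = {i: [] for i in range(n_bins)}
--     for i in values_list:
--         hash_value = hash_function(i, n_bins)
--         hash_table[hash_value].append(i)
--
--     return hash_table
-- ===== SOURCE B (Python) =====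
-- def simple_hash_table(values_list: list, n_bins: int) -> dict:
--     """Per-bin filtering: each bin is built independently by scanning the list."""
--     return {b: [v for v in values_list if int(v) % n_bins == b] for b in range(n_bins)}
-- ===== Notes on version B (the rewrite author's own statement) =====
-- stated objective: simpler
-- what changed: B builds each bin independently with a single dict comprehension filtering the list per bin index, instead of A's pre-initialised dict mutated by a single appending pass. Pre_ excludes only inputs where A raises (non-empty list with n_bins <= 0); B returns {} there.
-- outside the precondition, e.g. on simple_hash_table([1], 0): A raises ZeroDivisionError, B returns {}; on simple_hash_table([1], -2): A raises KeyError, B returns {}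
import Mathlib
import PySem

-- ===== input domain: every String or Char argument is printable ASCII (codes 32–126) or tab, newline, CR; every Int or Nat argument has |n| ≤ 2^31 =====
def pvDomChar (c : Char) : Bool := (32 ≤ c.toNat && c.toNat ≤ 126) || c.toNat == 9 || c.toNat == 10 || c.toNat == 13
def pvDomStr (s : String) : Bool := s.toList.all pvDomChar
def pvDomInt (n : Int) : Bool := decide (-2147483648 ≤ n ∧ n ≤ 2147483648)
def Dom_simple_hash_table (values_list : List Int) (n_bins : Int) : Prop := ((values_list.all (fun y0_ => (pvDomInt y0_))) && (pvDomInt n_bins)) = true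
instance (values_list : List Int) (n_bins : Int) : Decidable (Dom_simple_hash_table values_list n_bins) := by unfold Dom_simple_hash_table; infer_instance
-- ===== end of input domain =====

-- B replaces A's pre-initialised dict + appending pass by one dict comprehension
-- that filters the value list per bin (objective: simpler).

-- ===== PORT A =====
-- hash_table = {i: [] for i in range(n_bins)}; then for i in values_list: hash_table[int(i) % n_bins].append(i)
def simple_hash_table (values_list : List Int) (n_bins : Int) : List (Int × List Int) :=
  let hash_table : PySem.Dict Int (List Int) :=
    (PySem.List.pyRange 0 n_bins 1).foldl (fun d i => d.insert i ([] : List Int)) PySem.Dict.empty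
  let hash_table :=
    values_list.foldl (fun d i => d.modify (PySem.Int.mod i n_bins) [] (fun l => l ++ [i])) hash_table
  hash_table.items

-- ===== PORT B =====
-- {b: [v for v in values_list if int(v) % n_bins == b] for b in range(n_bins)}
def simple_hash_table_alt (values_list : List Int) (n_bins : Int) : List (Int × List Int) :=
  (PySem.List.pyRange 0 n_bins 1).map
    (fun b => (b, values_list.filter (fun v => PySem.Int.mod v n_bins == b)))

-- ===== PRECONDITION & SPEC =====
-- Pre_ excludes exactly the inputs on which A raises: with a non-empty values_list and
-- n_bins = 0 the modulo raises ZeroDivisionError, and with n_bins < 0 the (negative)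
-- hash value is missing from the empty table and indexing raises KeyError.
def Pre_simple_hash_table (values_list : List Int) (n_bins : Int) : Prop :=
  0 < n_bins ∨ values_list = []
instance (values_list : List Int) (n_bins : Int) : Decidable (Pre_simple_hash_table values_list n_bins) := by unfold Pre_simple_hash_table; infer_instance

def pvWitness_simple_hash_table : List Int × Int := ([3, -4, 7, 0, 10], 3)

def Spec_simple_hash_table (values_list : List Int) (n_bins : Int) (out : List (Int × List Int)) : Prop := out = simple_hash_table_alt values_list n_bins
instance (values_list : List Int) (n_bins : Int) (out : List (Int × List Int)) : Decidable (Spec_simple_hash_table values_list n_bins out) := by unfold Spec_simple_hash_table; infer_instance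

-- ===== CLAIM (what is proved, stated in full; the proofs are below) =====
def Claim_equal_simple_hash_table : Prop := ∀ (values_list : List Int) (n_bins : Int), Dom_simple_hash_table values_list n_bins → Pre_simple_hash_table values_list n_bins → Spec_simple_hash_table values_list n_bins (simple_hash_table values_list n_bins)
-- ===== LEMMAS AND PROOFS =====

-- The initial table: items are the range keys each with an empty list.
theorem init_items (n_bins : Int) :
    ((PySem.List.pyRange 0 n_bins 1).foldl
      (fun (d : PySem.Dict Int (List Int)) i => d.insert i ([] : List Int)) PySem.Dict.empty).items
    = (PySem.List.pyRange 0 n_bins 1).map (fun b => (b, ([] : List Int))) := by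
  have := PySem.Dict.items_foldl_insert_fresh (l := PySem.List.pyRange 0 n_bins 1)
    (d := (PySem.Dict.empty : PySem.Dict Int (List Int))) (k := fun a => a) (v := fun _ => ([] : List Int))
    (by intro a _; exact PySem.Dict.contains_empty a)
    (by simpa using PySem.List.nodup_pyRange_one 0 n_bins)
  simpa using this

-- items of a dict with Nodup keys are recovered from keys and getD.
theorem items_eq_map_keys (d : PySem.Dict Int (List Int)) (h : d.keys.Nodup) :
    d.items = d.keys.map (fun k => (k, d.getD k [])) := by
  obtain ⟨l⟩ := d
  induction l with
  | nil => rfl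
  | cons p rest ih =>
    obtain ⟨k, v⟩ := p
    simp only [PySem.Dict.keys] at h ⊢
    simp only [List.map_cons, List.nodup_cons] at h
    simp only [List.map_cons, List.cons.injEq]
    refine ⟨?_, ?_⟩
    · simp [PySem.Dict.getD_eq_get?_getD, PySem.Dict.get?_mk_cons]
    · have tail := ih h.2
      simp only [PySem.Dict.keys] at tail
      rw [List.map_congr_left (fun x hx => ?_), ← tail]
      have hxk : x ≠ k := by
        intro hk; exact h.1 (hk ▸ hx)
      simp [PySem.Dict.getD_eq_get?_getD, PySem.Dict.get?_mk_cons, show (k == x) = false by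
        simpa using (Ne.symm hxk)]

-- updating a set with elements it already contains leaves it unchanged
theorem set_update_of_subset (s : List Int) (xs : List Int) (h : ∀ x ∈ xs, x ∈ s) :
    PySem.Set.update s xs = s := by
  induction xs generalizing s with
  | nil => rfl
  | cons x xs ih =>
    have hx : x ∈ s := h x (by simp)
    have : PySem.Set.add s x = s := by
      simp [PySem.Set.add, hx]
    simp only [PySem.Set.update, List.foldl_cons, this]
    exact ih s (fun y hy => h y (by simp [hy]))

-- A's table equals B's comprehension on Pre_.
theorem table_eq (values_list : List Int) (n_bins : Int)
    (hp : 0 < n_bins ∨ values_list = []) :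
    simple_hash_table values_list n_bins = simple_hash_table_alt values_list n_bins := by
  unfold simple_hash_table simple_hash_table_alt
  rcases hp with hpos | hnil
  · -- 0 < n_bins
    set R := PySem.List.pyRange 0 n_bins 1 with hR
    set init : PySem.Dict Int (List Int) :=
      R.foldl (fun d i => d.insert i ([] : List Int)) PySem.Dict.empty with hinit
    have hinit_items : init.items = R.map (fun b => (b, ([] : List Int))) := init_items n_bins
    have hinit_keys : init.keys = R := by
      simp only [PySem.Dict.keys, hinit_items, List.map_map]
      simp only [Function.comp_def]
      exact List.map_id' R
    have hinit_nodup : init.keys.Nodup := by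
      rw [hinit_keys, hR]; exact PySem.List.nodup_pyRange_one 0 n_bins
    -- rewrite loop as foldl over pairs
    have hfold : values_list.foldl
        (fun (d : PySem.Dict Int (List Int)) i => d.modify (PySem.Int.mod i n_bins) [] (fun l => l ++ [i])) init
      = (values_list.map (fun i => (PySem.Int.mod i n_bins, i))).foldl
        (fun d p => d.modify p.1 [] (fun l => l ++ [p.2])) init := by
      rw [List.foldl_map]
    have hkeys : (values_list.foldl
        (fun (d : PySem.Dict Int (List Int)) i => d.modify (PySem.Int.mod i n_bins) [] (fun l => l ++ [i])) init).keys = R := by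
      rw [PySem.Dict.keys_foldl_modify_key values_list (fun i => PySem.Int.mod i n_bins) []
        (fun _ i l => l ++ [i]) init]
      rw [hinit_keys]
      apply set_update_of_subset
      intro x hx
      simp only [List.mem_map] at hx
      obtain ⟨i, _, rfl⟩ := hx
      rw [hR, PySem.List.mem_pyRange_one]
      exact ⟨PySem.Int.mod_nonneg i hpos, PySem.Int.mod_lt i hpos⟩
    have hnodup : (values_list.foldl
        (fun (d : PySem.Dict Int (List Int)) i => d.modify (PySem.Int.mod i n_bins) [] (fun l => l ++ [i])) init).keys.Nodup := PySem.Dict.nodup_keys_foldl_modify_key values_list (fun i => PySem.Int.mod i n_bins) []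
        (fun _ i l => l ++ [i]) init hinit_nodup
    have hgetD : ∀ b ∈ R, (values_list.foldl
        (fun (d : PySem.Dict Int (List Int)) i => d.modify (PySem.Int.mod i n_bins) [] (fun l => l ++ [i])) init).getD b [] = values_list.filter (fun v => PySem.Int.mod v n_bins == b) := by
      intro b hb
      have hinitb : init.getD b [] = [] := by
        apply PySem.Dict.getD_of_mem_items
        · rw [hinit_items]; exact List.mem_map_of_mem hb
        · exact hinit_nodup
      rw [hfold, PySem.Dict.getD_foldl_modify_append, hinitb, List.nil_append,
        List.filter_map]
      rw [List.map_map]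
      simp only [Function.comp_def]
      exact List.map_id' _
    rw [items_eq_map_keys _ hnodup, hkeys]
    exact List.map_congr_left (fun b hb => by rw [hgetD b hb])
  · subst hnil
    simp only [List.foldl_nil]
    rw [init_items]
    simp


-- ===== VERDICT (by name: the statement is the Claim_ definition above) =====
theorem simple_hash_table_spec : Claim_equal_simple_hash_table := by
  intro values_list n_bins _ hp
  unfold Spec_simple_hash_table
  exact table_eq values_list n_bins hp
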